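-- pv_equiv track=rewrite | github.com/mumunha/TeleCode | security.py | sanitize_commit_message
-- ===== SOURCE A (Python) =====
-- def sanitize_commit_message(message: str) -> str:
--     """Sanitize commit messages to prevent injection attacks."""
--     max_length = 200
--     forbidden_chars = ['`', '$', '\\', ';', '|', '&']
--
--     sanitized = message[:max_length]
--
--     for char in forbidden_chars:
--         sanitized = sanitized.replace(char, '')
--
--     sanitized = sanitized.strip()
--
--     if not sanitized:
--         sanitized = "TeleCode automated commit"
--
--     return sanitized
-- ===== SOURCE B (Python) =====
-- FORBIDDEN = frozenset('`$\\;|&')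
--
-- def sanitize_commit_message(message: str) -> str:
--     """Single pass over the truncated message with a set membership test."""
--     sanitized = ''.join(c for c in message[:200] if c not in FORBIDDEN).strip()
--     return sanitized if sanitized else "TeleCode automated commit"
-- ===== Notes on version B (the rewrite author's own statement) =====
-- stated objective: idiomatic
-- what changed: Replaces A's six whole-string str.replace passes (one per forbidden character) by a single pass over the truncated message filtering characters with a frozenset membership test.
import Mathlib
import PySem

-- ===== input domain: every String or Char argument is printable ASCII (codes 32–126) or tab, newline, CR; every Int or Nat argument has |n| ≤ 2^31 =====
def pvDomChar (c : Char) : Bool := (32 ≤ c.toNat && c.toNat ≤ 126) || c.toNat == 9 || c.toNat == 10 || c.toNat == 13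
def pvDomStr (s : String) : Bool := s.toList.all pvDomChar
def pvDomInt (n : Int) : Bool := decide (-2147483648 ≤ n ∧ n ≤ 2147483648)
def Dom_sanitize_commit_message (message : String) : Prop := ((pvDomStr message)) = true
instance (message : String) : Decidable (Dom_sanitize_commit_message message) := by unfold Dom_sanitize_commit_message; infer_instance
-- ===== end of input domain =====

-- B replaces A's six whole-string str.replace passes by one pass over the truncated
-- message filtering with a set membership test (objective: idiomatic/simpler).

-- ===== PORT A =====
def sanitize_commit_message (message : String) : String :=
  let max_length : Int := 200
  let forbidden_chars : List String := ["`", "$", "\\", ";", "|", "&"]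
  let sanitized := PySem.Str.slice message none (some max_length)
  let sanitized := forbidden_chars.foldl (fun s ch => PySem.Str.replace s ch "") sanitized
  let sanitized := PySem.Str.strip sanitized
  if sanitized = "" then "TeleCode automated commit" else sanitized

-- ===== PORT B =====
-- ''.join over the filtered characters is ported as String.ofList of the filtered
-- char list (exact: both build the string of exactly those characters in order).
def sanitize_commit_message_alt (message : String) : String :=
  let forbidden : PySem.Set Char := PySem.Set.ofList ['`', '$', '\\', ';', '|', '&']
  let sanitized := PySem.Str.strip
    (String.ofList (((PySem.Str.slice message none (some 200)).toList).filter
      (fun c => !(forbidden.contains c))))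
  if sanitized = "" then "TeleCode automated commit" else sanitized

-- ===== PRECONDITION & SPEC =====
def Spec_sanitize_commit_message (message : String) (out : String) : Prop := out = sanitize_commit_message_alt message
instance (message : String) (out : String) : Decidable (Spec_sanitize_commit_message message out) := by unfold Spec_sanitize_commit_message; infer_instance

-- ===== CLAIM (what is proved, stated in full; the proofs are below) =====
def Claim_equal_sanitize_commit_message : Prop := ∀ (message : String), Dom_sanitize_commit_message message → Spec_sanitize_commit_message message (sanitize_commit_message message)

-- ===== LEMMAS AND PROOFS =====

-- Removing every occurrence of a single character with str.replace(c, '') is filtering it out.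
theorem replace_go_single (c : Char) : ∀ (fuel : Nat) (l acc : List Char), l.length ≤ fuel →
    PySem.Chars.replace.go [c] [] fuel l acc = acc.reverse ++ l.filter (fun x => !(x == c)) := by
  intro fuel
  induction fuel with
  | zero =>
    intro l acc h
    have : l = [] := List.eq_nil_of_length_eq_zero (Nat.le_zero.mp h)
    subst this
    simp [PySem.Chars.replace.go]
  | succ n ih =>
    intro l acc h
    cases l with
    | nil => simp [PySem.Chars.replace.go]
    | cons a t =>
      by_cases hac : c = a
      · subst hac
        have hpre : [c].isPrefixOf (c :: t) = true := by simp [List.isPrefixOf]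
        simp only [PySem.Chars.replace.go, hpre, if_true]
        rw [show List.drop [c].length (c :: t) = t from rfl,
            show ([] : List Char).reverse ++ acc = acc from rfl,
            ih t acc (by simpa using Nat.le_of_succ_le_succ h)]
        simp
      · have hpre : [c].isPrefixOf (a :: t) = false := by
          simp [List.isPrefixOf]; exact fun h' => hac h'
        simp only [PySem.Chars.replace.go, hpre, Bool.false_eq_true, if_false]
        rw [ih t (a :: acc) (by simpa using Nat.le_of_succ_le_succ h)]
        simp [Ne.symm hac]

theorem replace_single (c : Char) (s : List Char) :
    PySem.Chars.replace s [c] [] = s.filter (fun x => !(x == c)) := by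
  have : ([c] : List Char).isEmpty = false := rfl
  simp only [PySem.Chars.replace, this, Bool.false_eq_true, if_false]
  simpa using replace_go_single c s.length s []

-- ===== VERDICT (by name: the statement is the Claim_ definition above) =====
theorem sanitize_commit_message_spec : Claim_equal_sanitize_commit_message := by
  intro message _
  unfold Spec_sanitize_commit_message sanitize_commit_message sanitize_commit_message_alt
  simp only [List.foldl]
  have hstrip : ∀ s t : String, s.toList = t.toList → PySem.Str.strip s = PySem.Str.strip t := by
    intro s t h; simp [PySem.Str.strip, h]
  have hlist :
      (PySem.Str.replace (PySem.Str.replace (PySem.Str.replace (PySem.Str.replace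
        (PySem.Str.replace (PySem.Str.replace (PySem.Str.slice message none (some 200))
        "`" "") "$" "") "\\" "") ";" "") "|" "") "&" "").toList
      = (String.ofList (((PySem.Str.slice message none (some 200)).toList).filter
          (fun c => !((PySem.Set.ofList ['`', '$', '\\', ';', '|', '&']).contains c)))).toList := by
    rw [String.toList_ofList]
    simp only [PySem.Str.toList_replace]
    have h1 : ("`" : String).toList = ['`'] := rfl
    have h2 : ("$" : String).toList = ['$'] := rfl
    have h3 : ("\\" : String).toList = ['\\'] := rfl
    have h4 : (";" : String).toList = [';'] := rfl
    have h5 : ("|" : String).toList = ['|'] := rfl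
    have h6 : ("&" : String).toList = ['&'] := rfl
    have h0 : ("" : String).toList = [] := rfl
    rw [h1, h2, h3, h4, h5, h6, h0]
    simp only [replace_single, List.filter_filter]
    refine List.filter_congr ?_
    intro c _
    have hset : PySem.Set.ofList ['`', '$', '\\', ';', '|', '&'] = ['`', '$', '\\', ';', '|', '&'] := by decide
    rw [hset]
    by_cases e1 : c = '`' <;> by_cases e2 : c = '$' <;> by_cases e3 : c = '\\' <;>
      by_cases e4 : c = ';' <;> by_cases e5 : c = '|' <;> by_cases e6 : c = '&' <;>
      simp [e1, e2, e3, e4, e5, e6]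
  rw [hstrip _ _ hlist]
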